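-- pv_equiv track=rewrite | github.com/cryptoxdog/L9 | staging/governance/hierarchical_authority_validator.py | _get_required_level
-- ===== SOURCE A (Python) =====
-- def _get_required_level(action: str) -> int:
--     """Get required authority level for action."""
--     action_lower = action.lower()
--
--     # Level 4 (CEO only) actions - Most restrictive
--     level_4_keywords = [
--         "shutdown", "destroy", "delete_all", "override_governance",
--         "modify_authority", "change_hierarchy", "system_destroy",
--         "drop_database", "delete_production"
--     ]
--     if any(keyword in action_lower for keyword in level_4_keywords):
--         return 4
--
--     # Level 3 (CTO+) actions - High authority
--     level_3_keywords = [
--         "architect", "governance_change", "authority_change",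
--         "modify_governance", "change_constitution", "alter_rules",
--         "create_agent", "modify_runtime"
--     ]
--     if any(keyword in action_lower for keyword in level_3_keywords):
--         return 3
--
--     # Level 2 (L9+) actions - Medium authority
--     level_2_keywords = [
--         "module_load", "runtime_change", "config_change",
--         "load_module", "reload_module", "change_config",
--         "modify_settings"
--     ]
--     if any(keyword in action_lower for keyword in level_2_keywords):
--         return 2
--
--     # Level 1 (all) actions - Basic operations
--     return 1
-- ===== SOURCE B (Python) =====
-- # One flat (level, keyword) table scanned once with a running maximum,
-- # instead of three short-circuiting priority checks.
-- _LEVEL_KEYWORDS = [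
--     (4, "shutdown"), (4, "destroy"), (4, "delete_all"), (4, "override_governance"),
--     (4, "modify_authority"), (4, "change_hierarchy"), (4, "system_destroy"),
--     (4, "drop_database"), (4, "delete_production"),
--     (3, "architect"), (3, "governance_change"), (3, "authority_change"),
--     (3, "modify_governance"), (3, "change_constitution"), (3, "alter_rules"),
--     (3, "create_agent"), (3, "modify_runtime"),
--     (2, "module_load"), (2, "runtime_change"), (2, "config_change"),
--     (2, "load_module"), (2, "reload_module"), (2, "change_config"),
--     (2, "modify_settings"),
-- ]
--
-- def _get_required_level(action: str) -> int:
--     action_lower = action.lower()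
--     best = 1
--     for level, keyword in _LEVEL_KEYWORDS:
--         if keyword in action_lower:
--             best = max(best, level)
--     return best
-- ===== Notes on version B (the rewrite author's own statement) =====
-- stated objective: alternative
-- what changed: Replaced the three short-circuiting per-level any() checks with one flat (level, keyword) table scanned in a single loop that keeps a running maximum (default 1).
import Mathlib
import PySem

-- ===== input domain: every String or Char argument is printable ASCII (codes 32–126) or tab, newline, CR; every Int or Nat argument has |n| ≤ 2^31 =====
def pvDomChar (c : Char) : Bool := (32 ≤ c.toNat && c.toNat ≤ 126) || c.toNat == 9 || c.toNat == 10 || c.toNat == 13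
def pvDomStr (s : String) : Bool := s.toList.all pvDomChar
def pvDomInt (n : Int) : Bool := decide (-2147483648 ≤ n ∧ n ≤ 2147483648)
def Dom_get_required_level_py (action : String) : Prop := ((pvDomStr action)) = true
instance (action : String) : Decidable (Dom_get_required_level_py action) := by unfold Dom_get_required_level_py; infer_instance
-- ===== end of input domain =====

-- B changes the decomposition: one flat (level, keyword) table scanned once with a running
-- maximum, instead of A's three short-circuiting per-level any() checks (objective: alternative).

-- ===== PORT A =====
def pvLvl4 : List String := ["shutdown", "destroy", "delete_all", "override_governance", "modify_authority", "change_hierarchy", "system_destroy", "drop_database", "delete_production"]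
def pvLvl3 : List String := ["architect", "governance_change", "authority_change", "modify_governance", "change_constitution", "alter_rules", "create_agent", "modify_runtime"]
def pvLvl2 : List String := ["module_load", "runtime_change", "config_change", "load_module", "reload_module", "change_config", "modify_settings"]

def get_required_level_py (action : String) : Int :=
  let action_lower := PySem.Str.lower action
  if pvLvl4.any (fun keyword => PySem.Str.isIn keyword action_lower) then 4
  else if pvLvl3.any (fun keyword => PySem.Str.isIn keyword action_lower) then 3
  else if pvLvl2.any (fun keyword => PySem.Str.isIn keyword action_lower) then 2
  else 1

-- ===== PORT B =====
def pvTable : List (Int × String) := [((4 : Int), "shutdown"), ((4 : Int), "destroy"), ((4 : Int), "delete_all"), ((4 : Int), "override_governance"), ((4 : Int), "modify_authority"), ((4 : Int), "change_hierarchy"), ((4 : Int), "system_destroy"), ((4 : Int), "drop_database"), ((4 : Int), "delete_production"), ((3 : Int), "architect"), ((3 : Int), "governance_change"), ((3 : Int), "authority_change"), ((3 : Int), "modify_governance"), ((3 : Int), "change_constitution"), ((3 : Int), "alter_rules"), ((3 : Int), "create_agent"), ((3 : Int), "modify_runtime"), ((2 : Int), "module_load"), ((2 : Int), "runtime_change"),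 ((2 : Int), "config_change"), ((2 : Int), "load_module"), ((2 : Int), "reload_module"), ((2 : Int), "change_config"), ((2 : Int), "modify_settings")]

def get_required_level_py_alt (action : String) : Int :=
  let action_lower := PySem.Str.lower action
  pvTable.foldl
    (fun best p => if PySem.Str.isIn p.2 action_lower then max best p.1 else best) 1

-- ===== PRECONDITION & SPEC =====
def Spec_get_required_level_py (action : String) (out : Int) : Prop := out = get_required_level_py_alt action
instance (action : String) (out : Int) : Decidable (Spec_get_required_level_py action out) := by unfold Spec_get_required_level_py; infer_instance

-- ===== CLAIM (what is proved, stated in full; the proofs are below) =====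
def Claim_equal_get_required_level_py : Prop := ∀ (action : String), Dom_get_required_level_py action → Spec_get_required_level_py action (get_required_level_py action)

-- ===== LEMMAS AND PROOFS =====

-- folding a block of equal-level entries equals one conditional max over the block's any()
theorem pv_fold_group (L : Int) (low : String) (kws : List String) (a : Int) :
    (kws.map (fun k => (L, k))).foldl
      (fun best p => if PySem.Str.isIn p.2 low then max best p.1 else best) a
      = if kws.any (fun k => PySem.Str.isIn k low) then max a L else a := by
  induction kws generalizing a with
  | nil => simp
  | cons k t ih =>
    simp only [List.map_cons, List.foldl_cons, List.any_cons]
    rw [ih]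
    rcases Bool.eq_false_or_eq_true (PySem.Str.isIn k low) with h | h <;>
      rcases Bool.eq_false_or_eq_true (t.any fun k => PySem.Str.isIn k low) with ht | ht <;>
      simp only [h, ht] <;> simp [max_assoc]

theorem pvTable_eq : pvTable =
    pvLvl4.map (fun k => ((4 : Int), k)) ++ pvLvl3.map (fun k => ((3 : Int), k))
      ++ pvLvl2.map (fun k => ((2 : Int), k)) := by
  rfl

-- ===== VERDICT (by name: the statement is the Claim_ definition above) =====
theorem get_required_level_py_spec : Claim_equal_get_required_level_py := by
  intro action _
  unfold Spec_get_required_level_py get_required_level_py get_required_level_py_alt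
  simp only [pvTable_eq, List.foldl_append]
  rw [pv_fold_group, pv_fold_group, pv_fold_group]
  rcases Bool.eq_false_or_eq_true (pvLvl4.any fun k => PySem.Str.isIn k (PySem.Str.lower action)) with h4 | h4 <;>
  rcases Bool.eq_false_or_eq_true (pvLvl3.any fun k => PySem.Str.isIn k (PySem.Str.lower action)) with h3 | h3 <;>
  rcases Bool.eq_false_or_eq_true (pvLvl2.any fun k => PySem.Str.isIn k (PySem.Str.lower action)) with h2 | h2 <;>
    simp only [h4, h3, h2] <;> decide
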